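-- pv_equiv track=rewrite | github.com/Justiceleeg/guten-vocab | scripts/analyze_students.py | filter_to_vocabulary
-- ===== SOURCE A (Python) =====
-- from typing import Dict, List, Tuple, Optional
--
-- def filter_to_vocabulary(
--     word_counts: Dict[str, int],
--     word_sentences: Dict[str, List[str]],
--     vocabulary_dict: Dict[str, int]  # lemmatized_word -> word_id
-- ) -> Tuple[Dict[str, Tuple[int, int]], Dict[str, List[str]]]:
--     """
--     Filter word counts and sentences to only vocabulary words.
--
--     Args:
--         word_counts: Dictionary of lemmatized_word -> count
--         word_sentences: Dictionary of lemmatized_word -> list of sentences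
--         vocabulary_dict: Dictionary of lemmatized_word -> word_id (from database)
--
--     Returns:
--         Tuple of:
--         - Dictionary mapping vocabulary_word -> (word_id, count)
--         - Dictionary mapping vocabulary_word -> list of sentences
--     """
--     filtered_counts = {}
--     filtered_sentences = {}
--
--     for lemmatized_word, count in word_counts.items():
--         if lemmatized_word in vocabulary_dict:
--             word_id = vocabulary_dict[lemmatized_word]
--             filtered_counts[lemmatized_word] = (word_id, count)
--             if lemmatized_word in word_sentences:
--                 filtered_sentences[lemmatized_word] = word_sentences[lemmatized_word]
--
--     return filtered_counts, filtered_sentences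
-- ===== SOURCE B (Python) =====
-- from typing import Dict, List, Tuple
--
--
-- def filter_to_vocabulary(
--     word_counts: Dict[str, int],
--     word_sentences: Dict[str, List[str]],
--     vocabulary_dict: Dict[str, int]
-- ) -> Tuple[Dict[str, Tuple[int, int]], Dict[str, List[str]]]:
--     """Sort-merge join of word_counts with vocabulary_dict (instead of hash probing):
--     sort both sides by word, intersect with two pointers, then restore the original
--     word_counts order via the remembered positions."""
--     left = sorted(((w, i, c) for i, (w, c) in enumerate(word_counts.items())),
--                   key=lambda t: t[0])
--     right = sorted(vocabulary_dict.items(), key=lambda t: t[0])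
--     matches = []
--     i = j = 0
--     while i < len(left) and j < len(right):
--         lw, idx, c = left[i]
--         rw, wid = right[j]
--         if lw < rw:
--             i += 1
--         elif rw < lw:
--             j += 1
--         else:
--             matches.append((idx, lw, wid, c))
--             i += 1
--             j += 1
--     matches = sorted(matches, key=lambda t: t[0])
--     filtered_counts = {w: (wid, c) for _, w, wid, c in matches}
--     filtered_sentences = {w: word_sentences[w] for _, w, _, _ in matches
--                           if w in word_sentences}
--     return filtered_counts, filtered_sentences
-- ===== Notes on version B (the rewrite author's own statement) =====
-- stated objective: alternative
-- what changed: A's single hash-probing pass over word_counts is replaced by a sort-merge join: both word_counts (with remembered positions) and vocabulary_dict are sorted by word, intersected with a two-pointer merge, and the matches are re-sorted by original position before the two result dicts are built.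
import Mathlib
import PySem

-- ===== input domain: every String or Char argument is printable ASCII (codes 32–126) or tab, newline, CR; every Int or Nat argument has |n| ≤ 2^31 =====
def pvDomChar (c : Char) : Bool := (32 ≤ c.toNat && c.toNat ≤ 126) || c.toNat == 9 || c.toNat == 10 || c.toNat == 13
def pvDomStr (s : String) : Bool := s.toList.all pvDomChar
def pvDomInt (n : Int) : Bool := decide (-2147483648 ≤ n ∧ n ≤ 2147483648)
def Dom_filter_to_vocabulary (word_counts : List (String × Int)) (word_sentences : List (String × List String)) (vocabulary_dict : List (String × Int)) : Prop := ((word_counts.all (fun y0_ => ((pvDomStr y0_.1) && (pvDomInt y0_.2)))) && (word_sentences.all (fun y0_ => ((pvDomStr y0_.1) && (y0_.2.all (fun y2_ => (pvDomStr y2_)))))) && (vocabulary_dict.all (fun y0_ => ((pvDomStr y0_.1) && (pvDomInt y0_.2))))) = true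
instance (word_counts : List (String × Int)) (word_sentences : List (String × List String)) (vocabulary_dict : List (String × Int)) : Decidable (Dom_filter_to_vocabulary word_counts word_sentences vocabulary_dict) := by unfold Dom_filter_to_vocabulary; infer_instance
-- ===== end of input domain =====

-- B replaces A's hash-probing pass over word_counts by a sort-merge join (sort both
-- sides by word, two-pointer intersect, re-sort matches by original position): a
-- genuinely different algorithm with the same result (objective: alternative).


-- ===== PORT A =====
-- A: one loop over word_counts.items(), filling filtered_counts and filtered_sentences together.
def filter_to_vocabulary (word_counts : List (String × Int)) (word_sentences : List (String × List String)) (vocabulary_dict : List (String × Int)) : (List (String × Int × Int)) × (List (String × List String)) :=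
  let vdd := PySem.Dict.mk vocabulary_dict
  let wsd := PySem.Dict.mk word_sentences
  let st := word_counts.foldl
    (fun (st : PySem.Dict String (Int × Int) × PySem.Dict String (List String)) p =>
      if vdd.contains p.1 then
        let word_id := vdd.getD p.1 0   -- vocabulary_dict[word]: guarded by the `in` test, so getD is exact
        let fc := st.1.insert p.1 (word_id, p.2)
        let fs := if wsd.contains p.1 then st.2.insert p.1 (wsd.getD p.1 []) else st.2
        (fc, fs)
      else st)
    (PySem.Dict.empty, PySem.Dict.empty)
  (st.1.items, st.2.items)

-- ===== PORT B =====
-- B's two-pointer merge of the two word-sorted lists (the while loop of Source B,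
-- as structural recursion on the two lists).
def pvMergeJoin : List (String × Int × Int) → List (String × Int) → List (Int × String × Int × Int)
  | [], _ => []
  | _ :: _, [] => []
  | (lw, idx, c) :: ls, (rw, wid) :: rs =>
    if lw < rw then pvMergeJoin ls ((rw, wid) :: rs)
    else if rw < lw then pvMergeJoin ((lw, idx, c) :: ls) rs
    else (idx, lw, wid, c) :: pvMergeJoin ls rs
termination_by ls rs => ls.length + rs.length

-- B: sort-merge join, then re-sort the matches by original position and build both dicts.
def filter_to_vocabulary_alt (word_counts : List (String × Int)) (word_sentences : List (String × List String)) (vocabulary_dict : List (String × Int)) : (List (String × Int × Int)) × (List (String × List String)) :=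
  let wsd := PySem.Dict.mk word_sentences
  let left := PySem.List.sorted ((PySem.List.enumerate word_counts 0).map (fun q => (q.2.1, q.1, q.2.2))) (fun t => t.1)
  let right := PySem.List.sorted vocabulary_dict (fun t => t.1)
  let ms := PySem.List.sorted (pvMergeJoin left right) (fun t => t.1)
  let fc := ms.foldl (fun (d : PySem.Dict String (Int × Int)) t => d.insert t.2.1 (t.2.2.1, t.2.2.2)) PySem.Dict.empty
  let fs := ms.foldl (fun (d : PySem.Dict String (List String)) t => if wsd.contains t.2.1 then d.insert t.2.1 (wsd.getD t.2.1 []) else d) PySem.Dict.empty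
  (fc.items, fs.items)

-- ===== PRECONDITION & SPEC =====
-- Pre_ excludes association lists with duplicate keys in word_counts or vocabulary_dict:
-- those never arise from Python dicts (A's inputs are dicts), and on such lists A's
-- dict-overwrite behaviour and B's merge join are both accidental.
def Pre_filter_to_vocabulary (word_counts : List (String × Int)) (word_sentences : List (String × List String)) (vocabulary_dict : List (String × Int)) : Prop :=
  (word_counts.map (·.1)).Nodup ∧ (vocabulary_dict.map (·.1)).Nodup
instance (word_counts : List (String × Int)) (word_sentences : List (String × List String)) (vocabulary_dict : List (String × Int)) : Decidable (Pre_filter_to_vocabulary word_counts word_sentences vocabulary_dict) := by unfold Pre_filter_to_vocabulary; infer_instance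

def pvWitness_filter_to_vocabulary : (List (String × Int)) × (List (String × List String)) × (List (String × Int)) :=
  ([("a", 2), ("b", 1)], [("a", ["s1"])], [("a", 7), ("c", 9)])

def Spec_filter_to_vocabulary (word_counts : List (String × Int)) (word_sentences : List (String × List String)) (vocabulary_dict : List (String × Int)) (out : (List (String × Int × Int)) × (List (String × List String))) : Prop := out = filter_to_vocabulary_alt word_counts word_sentences vocabulary_dict
instance (word_counts : List (String × Int)) (word_sentences : List (String × List String)) (vocabulary_dict : List (String × Int)) (out : (List (String × Int × Int)) × (List (String × List String))) : Decidable (Spec_filter_to_vocabulary word_counts word_sentences vocabulary_dict out) := by unfold Spec_filter_to_vocabulary; infer_instance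

-- ===== CLAIM (what is proved, stated in full; the proofs are below) =====
def Claim_equal_filter_to_vocabulary : Prop := ∀ (word_counts : List (String × Int)) (word_sentences : List (String × List String)) (vocabulary_dict : List (String × Int)), Dom_filter_to_vocabulary word_counts word_sentences vocabulary_dict → Pre_filter_to_vocabulary word_counts word_sentences vocabulary_dict → Spec_filter_to_vocabulary word_counts word_sentences vocabulary_dict (filter_to_vocabulary word_counts word_sentences vocabulary_dict)

-- ===== LEMMAS AND PROOFS =====

-- assoc-list lookup agrees with Dict.mk lookup (both first-match)
theorem pv_lookup_eq_mk_get? (l : List (String × Int)) (w : String) :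
    List.lookup w l = (PySem.Dict.mk l).get? w := by
  induction l with
  | nil => rfl
  | cons p t ih =>
    obtain ⟨k, v⟩ := p
    rw [List.lookup_cons, PySem.Dict.get?_mk_cons]
    by_cases h : w = k
    · simp [h]
    · have hb : (w == k) = false := by simp [h]
      have hb' : (k == w) = false := by simp [Ne.symm h]
      simp [hb, hb', ih]

theorem pv_lookup_eq_none_of_lt (w : String) :
    ∀ (l : List (String × Int)), (∀ p ∈ l, w < p.1) → List.lookup w l = none := by
  intro l
  induction l with
  | nil => intro _; rfl
  | cons p t ih =>
    intro h
    rw [List.lookup_cons]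
    have hw : (w == p.1) = false := by simp [ne_of_lt (h p (by simp))]
    rw [hw]
    exact ih (fun q hq => h q (by simp [hq]))

theorem pv_lookup_eq_some_iff_mem (w : String) (v : Int) :
    ∀ (l : List (String × Int)), (l.map (·.1)).Nodup →
    (List.lookup w l = some v ↔ (w, v) ∈ l) := by
  intro l
  induction l with
  | nil => intro _; simp
  | cons p t ih =>
    obtain ⟨k, v'⟩ := p
    intro hnd
    simp only [List.map_cons, List.nodup_cons] at hnd
    by_cases h : w = k
    · subst h
      have hb : (w == w) = true := by simp
      rw [List.lookup_cons]
      simp only [hb]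
      constructor
      · intro hs
        have : v' = v := by cases hs; rfl
        subst this
        exact List.mem_cons_self
      · intro hm
        rcases List.mem_cons.mp hm with hm | hm
        · cases hm; rfl
        · exact absurd (List.mem_map.mpr ⟨(w, v), hm, rfl⟩) hnd.1
    · have hb : (w == k) = false := by simp [h]
      rw [List.lookup_cons]
      simp only [hb]
      rw [ih hnd.2]
      constructor
      · exact fun hm => List.mem_cons_of_mem _ hm
      · intro hm
        rcases List.mem_cons.mp hm with hm | hm
        · exact absurd (congrArg Prod.fst hm) h
        · exact hm

-- lookup is invariant under permutation when keys are unique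
theorem pv_lookup_perm (w : String) (l l' : List (String × Int))
    (hp : l.Perm l') (hnd : (l.map (·.1)).Nodup) :
    List.lookup w l' = List.lookup w l := by
  have hnd' : (l'.map (·.1)).Nodup := ((hp.map (·.1)).nodup hnd)
  cases h : List.lookup w l with
  | some v =>
    have hm : (w, v) ∈ l := (pv_lookup_eq_some_iff_mem w v l hnd).mp h
    exact (pv_lookup_eq_some_iff_mem w v l' hnd').mpr (hp.mem_iff.mp hm)
  | none =>
    cases h' : List.lookup w l' with
    | none => rfl
    | some v =>
      have hm : (w, v) ∈ l' := (pv_lookup_eq_some_iff_mem w v l' hnd').mp h'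
      have : (w, v) ∈ l := hp.mem_iff.mpr hm
      rw [(pv_lookup_eq_some_iff_mem w v l hnd).mpr this] at h
      exact absurd h (by simp)

-- strict pairwise order on keys from sortedness + distinct keys
theorem pv_pairwise_lt_of_sorted_nodup {α : Type} (l : List α) (key : α → String) :
    (PySem.List.sorted l key).Pairwise (fun a b => key a ≤ key b) →
    (l.map key).Nodup →
    (PySem.List.sorted l key).Pairwise (fun a b => key a < key b) := by
  intro hle hnd
  have hnd' : ((PySem.List.sorted l key).map key).Nodup :=
    (((PySem.List.sorted_perm l key false).map key).symm).nodup hnd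
  have hne : (PySem.List.sorted l key).Pairwise (fun a b => key a ≠ key b) :=
    List.pairwise_map.mp hnd'
  exact (hle.and hne).imp (fun h => lt_of_le_of_ne h.1 h.2)

-- the merge join, on key-sorted inputs with distinct keys, is a lookup-filterMap over the left list
theorem pv_mergeJoin_eq (ls : List (String × Int × Int)) (rs : List (String × Int))
    (hL : ls.Pairwise (fun a b => a.1 < b.1)) (hR : rs.Pairwise (fun a b => a.1 < b.1)) :
    pvMergeJoin ls rs =
      ls.filterMap (fun t => (List.lookup t.1 rs).map (fun wid => (t.2.1, t.1, wid, t.2.2))) := by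
  fun_induction pvMergeJoin ls rs with
  | case1 rs => simp
  | case2 l ls => simp [List.lookup]
  | case3 lw idx c ls rw wid rs hlt ih =>
    rw [List.filterMap_cons]
    have hnone : List.lookup lw ((rw, wid) :: rs) = none := by
      apply pv_lookup_eq_none_of_lt
      intro p hp
      rcases List.mem_cons.mp hp with h | h
      · rw [h]; exact hlt
      · exact lt_trans hlt (List.rel_of_pairwise_cons hR h)
    simp only [hnone, Option.map_none]
    exact ih hL.tail hR
  | case4 lw idx c ls rw wid rs hlt1 hlt2 ih =>
    rw [ih (by exact hL) hR.tail]
    apply List.filterMap_congr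
    intro t ht
    have hgt : rw < t.1 := by
      rcases List.mem_cons.mp ht with h | h
      · rw [h]; exact hlt2
      · exact lt_trans hlt2 (List.rel_of_pairwise_cons hL h)
    rw [List.lookup_cons]
    have hb : (t.1 == rw) = false := by simp [ne_of_gt hgt]
    rw [hb]
  | case5 lw idx c ls rw wid rs hlt1 hlt2 ih =>
    have heq : lw = rw := le_antisymm (not_lt.mp hlt2) (not_lt.mp hlt1)
    subst heq
    rw [List.filterMap_cons]
    have hhead : List.lookup lw ((lw, wid) :: rs) = some wid := by
      rw [List.lookup_cons]; simp
    simp only [hhead, Option.map_some]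
    rw [ih hL.tail hR.tail]
    congr 1
    apply List.filterMap_congr
    intro t ht
    have hgt : lw < t.1 := List.rel_of_pairwise_cons hL ht
    rw [List.lookup_cons]
    have hb : (t.1 == lw) = false := by simp [ne_of_gt hgt]
    rw [hb]

-- a filterMap that is pointwise an if-some/none is filter-then-map
theorem pv_filterMap_eq_filter_map {α β : Type} (l : List α) (f : α → Option β)
    (p : α → Bool) (h : α → β)
    (hpt : ∀ x ∈ l, f x = if p x then some (h x) else none) :
    l.filterMap f = (l.filter p).map h := by
  induction l with
  | nil => rfl
  | cons x t ih =>
    rw [List.filterMap_cons, hpt x (by simp), List.filter_cons]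
    by_cases hx : p x = true
    · simp only [hx, if_true, List.map_cons]
      rw [ih (fun y hy => hpt y (by simp [hy]))]
    · simp only [hx, if_false, Bool.false_eq_true]
      rw [ih (fun y hy => hpt y (by simp [hy]))]

-- pushing a filter-and-project through enumerate
theorem pv_enum_filter_map {γ : Type} (P : String → Bool) (H : String × Int → γ) :
    ∀ (xs : List (String × Int)) (s : Int),
    (((PySem.List.enumerate xs s).filter (fun q => P q.2.1)).map (fun q => H q.2))
      = (xs.filter (fun p => P p.1)).map H := by
  intro xs
  induction xs with
  | nil => intro s; rfl
  | cons x t ih =>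
    intro s
    rw [PySem.List.enumerate_cons, List.filter_cons, List.filter_cons]
    by_cases hx : P x.1 = true
    · simp only [hx, if_true, List.map_cons, ih]
    · simp only [hx, if_false, Bool.false_eq_true, ih]

-- ===== the two sides, characterised =====

-- A's combined fold splits into two independent folds
theorem pv_A_split (vdd : PySem.Dict String Int) (wsd : PySem.Dict String (List String))
    (wc : List (String × Int)) :
    wc.foldl
      (fun (st : PySem.Dict String (Int × Int) × PySem.Dict String (List String)) p =>
        if vdd.contains p.1 then
          (st.1.insert p.1 (vdd.getD p.1 0, p.2),
           if wsd.contains p.1 then st.2.insert p.1 (wsd.getD p.1 []) else st.2)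
        else st)
      (PySem.Dict.empty, PySem.Dict.empty)
    = (wc.foldl (fun d p => if vdd.contains p.1 then d.insert p.1 (vdd.getD p.1 0, p.2) else d) PySem.Dict.empty,
       wc.foldl (fun d p => if vdd.contains p.1 && wsd.contains p.1 then d.insert p.1 (wsd.getD p.1 []) else d) PySem.Dict.empty) := by
  rw [show (fun (st : PySem.Dict String (Int × Int) × PySem.Dict String (List String)) (p : String × Int) =>
        if vdd.contains p.1 then
          (st.1.insert p.1 (vdd.getD p.1 0, p.2),
           if wsd.contains p.1 then st.2.insert p.1 (wsd.getD p.1 []) else st.2)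
        else st)
      = (fun st p =>
          ((fun d (p : String × Int) => if vdd.contains p.1 then d.insert p.1 (vdd.getD p.1 0, p.2) else d) st.1 p,
           (fun d (p : String × Int) => if vdd.contains p.1 && wsd.contains p.1 then d.insert p.1 (wsd.getD p.1 []) else d) st.2 p))
      from by
        funext st p
        by_cases h1 : vdd.contains p.1 = true
        · by_cases h2 : wsd.contains p.1 = true <;> simp [h1, h2]
        · simp [h1]]
  exact PySem.List.foldl_prod_mk
    (fun d (p : String × Int) => if vdd.contains p.1 then d.insert p.1 (vdd.getD p.1 0, p.2) else d)
    (fun d (p : String × Int) => if vdd.contains p.1 && wsd.contains p.1 then d.insert p.1 (wsd.getD p.1 []) else d)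
    wc PySem.Dict.empty PySem.Dict.empty

-- keys of a filtered word_counts stay distinct
theorem pv_filter_keys_nodup (wc : List (String × Int)) (P : String × Int → Bool)
    (hnd : (wc.map (·.1)).Nodup) : ((wc.filter P).map (·.1)).Nodup := by
  have hsub : ((wc.filter P).map (fun p : String × Int => p.1)).Sublist
      (wc.map (fun p : String × Int => p.1)) :=
    List.Sublist.map _ List.filter_sublist
  exact hsub.nodup hnd

-- items of an insert-fold over filtered word_counts
theorem pv_fold_items {ν : Type} (wc : List (String × Int)) (P : String × Int → Bool)
    (v : String × Int → ν) (hnd : (wc.map (·.1)).Nodup) :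
    ((wc.filter P).foldl (fun (d : PySem.Dict String ν) p => d.insert p.1 (v p)) PySem.Dict.empty).items
      = (wc.filter P).map (fun p => (p.1, v p)) := by
  have h := PySem.Dict.items_foldl_insert_fresh (wc.filter P) (fun p : String × Int => p.1)
    v PySem.Dict.empty (by intro a _; simp) (pv_filter_keys_nodup wc P hnd)
  simpa using h

-- B's sorted match list IS the in-order filtered enumeration
theorem pv_matches_eq (wc vd : List (String × Int))
    (hwc : (wc.map (·.1)).Nodup) (hvd : (vd.map (·.1)).Nodup) :
    PySem.List.sorted
      (pvMergeJoin
        (PySem.List.sorted ((PySem.List.enumerate wc 0).map (fun q => (q.2.1, q.1, q.2.2))) (fun t => t.1))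
        (PySem.List.sorted vd (fun t => t.1)))
      (fun t => t.1)
    = ((PySem.List.enumerate wc 0).filter (fun q => (PySem.Dict.mk vd).contains q.2.1)).map
        (fun q => (q.1, q.2.1, (PySem.Dict.mk vd).getD q.2.1 0, q.2.2)) := by
  set vdd := PySem.Dict.mk vd with hvdd
  set L0 := (PySem.List.enumerate wc 0).map (fun q : Int × String × Int => (q.2.1, q.1, q.2.2)) with hL0
  set left := PySem.List.sorted L0 (fun t => t.1) with hleft
  set right := PySem.List.sorted vd (fun t => t.1) with hright
  set C := ((PySem.List.enumerate wc 0).filter (fun q => vdd.contains q.2.1)).map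
      (fun q => (q.1, q.2.1, vdd.getD q.2.1 0, q.2.2)) with hC
  -- key-nodup of L0
  have hL0nd : (L0.map (·.1)).Nodup := by
    rw [hL0, List.map_map]
    have : ((fun t : String × Int × Int => t.1) ∘ (fun q : Int × String × Int => (q.2.1, q.1, q.2.2)))
        = (fun q : Int × String × Int => q.2.1) := rfl
    rw [this]
    have : (PySem.List.enumerate wc 0).map (fun q => q.2.1)
        = ((PySem.List.enumerate wc 0).map (·.2)).map (·.1) := by rw [List.map_map]; rfl
    rw [this, PySem.List.map_snd_enumerate]
    exact hwc
  -- sorted sides have strictly increasing keys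
  have hLp : left.Pairwise (fun a b => a.1 < b.1) :=
    pv_pairwise_lt_of_sorted_nodup L0 (·.1) (PySem.List.sorted_pairwise L0 (·.1)) hL0nd
  have hRp : right.Pairwise (fun a b => a.1 < b.1) :=
    pv_pairwise_lt_of_sorted_nodup vd (·.1) (PySem.List.sorted_pairwise vd (·.1)) hvd
  -- the merge join is the lookup-filterMap over left
  rw [pv_mergeJoin_eq left right hLp hRp]
  -- … whose sorted-by-index form is exactly C
  apply PySem.List.sorted_eq_of_perm_of_pairwise_lt
  · -- C ~ filterMap over left
    have h1 : (left.filterMap (fun t => (List.lookup t.1 right).map (fun wid => (t.2.1, t.1, wid, t.2.2)))).Perm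
        (L0.filterMap (fun t => (List.lookup t.1 right).map (fun wid => (t.2.1, t.1, wid, t.2.2)))) :=
      List.Perm.filterMap _ (PySem.List.sorted_perm L0 (·.1) false)
    have h2 : L0.filterMap (fun t => (List.lookup t.1 right).map (fun wid => (t.2.1, t.1, wid, t.2.2))) = C := by
      rw [hL0, List.filterMap_map, hC]
      apply pv_filterMap_eq_filter_map (PySem.List.enumerate wc 0) _
        (fun q => vdd.contains q.2.1)
        (fun q => (q.1, q.2.1, vdd.getD q.2.1 0, q.2.2))
      intro q _
      have hlk : List.lookup q.2.1 right = vdd.get? q.2.1 := by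
        rw [pv_lookup_perm q.2.1 vd right (PySem.List.sorted_perm vd (·.1) false).symm hvd,
          pv_lookup_eq_mk_get?]
      simp only [Function.comp_apply, hlk]
      rw [PySem.Dict.contains_eq_isSome_get?, PySem.Dict.getD_eq_get?_getD]
      cases vdd.get? q.2.1 <;> simp
    rw [h2] at h1
    exact h1.symm
  · -- C is strictly increasing in the index
    rw [hC]
    rw [List.pairwise_map]
    exact ((PySem.List.pairwise_lt_enumerate wc 0).filter _).imp (fun h => h)

-- ===== VERDICT (by name: the statement is the Claim_ definition above) =====
theorem filter_to_vocabulary_spec : Claim_equal_filter_to_vocabulary := by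
  intro wc ws vd _ hpre
  obtain ⟨hwc, hvd⟩ := hpre
  simp only [Spec_filter_to_vocabulary, filter_to_vocabulary, filter_to_vocabulary_alt]
  set vdd := PySem.Dict.mk vd
  set wsd := PySem.Dict.mk ws
  rw [pv_A_split vdd wsd wc, pv_matches_eq wc vd hwc hvd]
  set C := ((PySem.List.enumerate wc 0).filter (fun q => vdd.contains q.2.1)).map
      (fun q => (q.1, q.2.1, vdd.getD q.2.1 0, q.2.2)) with hC
  -- key-nodup of C
  have hCnd : (C.map (·.2.1)).Nodup := by
    rw [hC, List.map_map]
    have : ((fun t : Int × String × Int × Int => t.2.1)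
        ∘ (fun q : Int × String × Int => (q.1, q.2.1, vdd.getD q.2.1 0, q.2.2)))
        = (fun q : Int × String × Int => q.2.1) := rfl
    rw [this]
    have hsub : (((PySem.List.enumerate wc 0).filter (fun q => vdd.contains q.2.1)).map
        (fun q : Int × String × Int => q.2.1)).Sublist
        ((PySem.List.enumerate wc 0).map (fun q : Int × String × Int => q.2.1)) :=
      (List.filter_sublist).map _
    apply hsub.nodup
    have : (PySem.List.enumerate wc 0).map (fun q : Int × String × Int => q.2.1)
        = ((PySem.List.enumerate wc 0).map (·.2)).map (·.1) := by rw [List.map_map]; rfl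
    rw [this, PySem.List.map_snd_enumerate]
    exact hwc
  simp only [Prod.mk.injEq]
  refine ⟨?_, ?_⟩
  · -- filtered_counts
    rw [PySem.List.foldl_if_eq_foldl_filter (fun p => vdd.contains p.1) _ wc,
      pv_fold_items wc _ (fun p => (vdd.getD p.1 0, p.2)) hwc,
      PySem.Dict.items_foldl_insert_fresh C (fun t => t.2.1) (fun t => (t.2.2.1, t.2.2.2)) PySem.Dict.empty
        (by intro a _; simp) hCnd]
    rw [hC, List.map_map]
    have : ((fun t : Int × String × Int × Int => (t.2.1, t.2.2.1, t.2.2.2))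
        ∘ (fun q : Int × String × Int => (q.1, q.2.1, vdd.getD q.2.1 0, q.2.2)))
        = (fun q : Int × String × Int => ((fun p : String × Int => (p.1, vdd.getD p.1 0, p.2)) q.2)) := rfl
    rw [this, pv_enum_filter_map (fun w => vdd.contains w) (fun p => (p.1, vdd.getD p.1 0, p.2)) wc 0]
    rfl
  · -- filtered_sentences
    rw [PySem.List.foldl_if_eq_foldl_filter (fun p => vdd.contains p.1 && wsd.contains p.1) _ wc,
      pv_fold_items wc _ (fun p => wsd.getD p.1 []) hwc,
      PySem.List.foldl_if_eq_foldl_filter (fun t => wsd.contains t.2.1) _ C]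
    have hCf : C.filter (fun t => wsd.contains t.2.1)
        = ((PySem.List.enumerate wc 0).filter
            (fun q => vdd.contains q.2.1 && wsd.contains q.2.1)).map
            (fun q => (q.1, q.2.1, vdd.getD q.2.1 0, q.2.2)) := by
      rw [hC, List.filter_map]
      have : ((fun t : Int × String × Int × Int => wsd.contains t.2.1)
          ∘ (fun q : Int × String × Int => (q.1, q.2.1, vdd.getD q.2.1 0, q.2.2)))
          = (fun q : Int × String × Int => wsd.contains q.2.1) := rfl
      rw [this, List.filter_filter]
      congr 1
      apply List.filter_congr
      intro q _
      rw [Bool.and_comm]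
    have hnd2 : ((C.filter (fun t => wsd.contains t.2.1)).map (·.2.1)).Nodup :=
      ((List.filter_sublist).map _).nodup hCnd
    rw [PySem.Dict.items_foldl_insert_fresh (C.filter (fun t => wsd.contains t.2.1))
        (fun t : Int × String × Int × Int => t.2.1)
        (fun t : Int × String × Int × Int => wsd.getD t.2.1 []) PySem.Dict.empty
        (by intro a _; simp) hnd2]
    rw [hCf, List.map_map]
    have : ((fun t : Int × String × Int × Int => (t.2.1, wsd.getD t.2.1 []))
        ∘ (fun q : Int × String × Int => (q.1, q.2.1, vdd.getD q.2.1 0, q.2.2)))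
        = (fun q : Int × String × Int => ((fun p : String × Int => (p.1, wsd.getD p.1 [])) q.2)) := rfl
    rw [this, pv_enum_filter_map (fun w => vdd.contains w && wsd.contains w) (fun p => (p.1, wsd.getD p.1 [])) wc 0]
    rfl
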